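-- pv_equiv track=rewrite | github.com/pjoscely/Advent-Of-Code-2019 | Advent of Code 2019 Day 4.py | modifiedAdj
-- ===== SOURCE A (Python) =====
-- def modifiedAdj(n):
--
--   temp = str(n)
--
--   for i in range(len(temp)-1):
--
--     if temp[i] == temp[i+1]:
--
--       c =temp[i]*2
--
--       d = temp[i]*3
--
--       if c in temp and d not in temp:
--
--         return True
--
--   return False
-- ===== SOURCE B (Python) =====
-- def modifiedAdj(n):
--     s = str(n)
--     best = {}
--     i = 0
--     L = len(s)
--     while i < L:
--         j = i + 1
--         while j < L and s[j] == s[i]: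
--             j += 1
--         run = j - i
--         if run > best.get(s[i], 0):
--             best[s[i]] = run
--         i = j
--     return any(v == 2 for v in best.values())
-- ===== Notes on version B (the rewrite author's own statement) =====
-- stated objective: alternative
-- what changed: Replaces the adjacent-pair scan with substring membership tests (d*2 in s, d*3 not in s) by a single run-length pass that records each character's maximum run length in a dict and returns whether any maximum equals exactly 2.
import Mathlib
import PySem

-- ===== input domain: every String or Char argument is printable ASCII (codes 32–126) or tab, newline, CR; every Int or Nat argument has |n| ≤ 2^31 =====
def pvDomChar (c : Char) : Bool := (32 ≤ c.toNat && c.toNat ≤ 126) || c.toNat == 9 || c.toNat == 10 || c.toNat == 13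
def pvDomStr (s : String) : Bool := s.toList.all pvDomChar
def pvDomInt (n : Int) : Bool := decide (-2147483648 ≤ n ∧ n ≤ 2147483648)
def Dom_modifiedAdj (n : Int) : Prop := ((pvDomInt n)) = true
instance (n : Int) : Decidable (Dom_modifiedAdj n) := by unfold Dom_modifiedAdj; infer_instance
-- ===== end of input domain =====

-- B replaces A's adjacent-pair scan with substring tests by a single run-length pass
-- keeping each character's maximum run length in a dict (alternative decomposition).

-- ===== PORT A =====
def modifiedAdj (n : Int) : Bool :=
  let temp := PySem.Int.toChars n
  (PySem.List.pyRange 0 ((temp.length : Int) - 1) 1).any (fun i =>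
    match PySem.Chars.pyGet? temp i, PySem.Chars.pyGet? temp (i + 1) with
    | some a, some b =>
      if a == b then
        let c := [a, a]        -- temp[i]*2
        let d := [a, a, a]     -- temp[i]*3
        PySem.Chars.isIn c temp && !(PySem.Chars.isIn d temp)
      else false
    | _, _ => false)  -- unreachable: i and i+1 are valid indices

-- ===== PORT B =====
-- inner while loop: length of the leading run of c
def takeRun (c : Char) : List Char → Nat
  | [] => 0
  | x :: xs => if x == c then takeRun c xs + 1 else 0

-- outer while loop: record max run length per character
def bLoop (best : PySem.Dict Char Int) : List Char → PySem.Dict Char Int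
  | [] => best
  | x :: rest =>
    let k := takeRun x rest
    let run : Int := (k : Int) + 1
    let best' := if best.getD x 0 < run then best.insert x run else best
    bLoop best' (rest.drop k)
  termination_by s => s.length
  decreasing_by simp

def modifiedAdj_alt (n : Int) : Bool :=
  ((bLoop PySem.Dict.empty (PySem.Int.toChars n)).values).any (fun v => v == 2)

-- ===== PRECONDITION & SPEC =====
def Spec_modifiedAdj (n : Int) (out : Bool) : Prop := out = modifiedAdj_alt n
instance (n : Int) (out : Bool) : Decidable (Spec_modifiedAdj n out) := by unfold Spec_modifiedAdj; infer_instance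

-- ===== CLAIM (what is proved, stated in full; the proofs are below) =====
def Claim_equal_modifiedAdj : Prop := ∀ (n : Int), Dom_modifiedAdj n → Spec_modifiedAdj n (modifiedAdj n)

-- ===== LEMMAS AND PROOFS =====

-- spec: maximum run length of c anywhere in s
def maxRunSpec (c : Char) : List Char → Nat
  | [] => 0
  | x :: rest => max (if x == c then takeRun c rest + 1 else 0) (maxRunSpec c rest)

theorem takeRun_replicate_append (x : Char) (m : Nat) (t : List Char) :
    takeRun x (List.replicate m x ++ t) = m + takeRun x t := by
  induction m with
  | zero => simp
  | succ m ih => simp [List.replicate_succ, takeRun, ih]; omega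

theorem takeRun_decomp (x : Char) (rest : List Char) :
    rest = List.replicate (takeRun x rest) x ++ rest.drop (takeRun x rest)
    ∧ takeRun x (rest.drop (takeRun x rest)) = 0 := by
  induction rest with
  | nil => simp [takeRun]
  | cons y ys ih =>
    by_cases h : y = x
    · subst h
      simp only [takeRun, beq_self_eq_true, if_true]
      refine ⟨?_, ih.2⟩
      simp [List.replicate_succ]
      exact ih.1
    · simp [takeRun, h]

theorem maxRunSpec_replicate_append_self (x : Char) (m : Nat) (t : List Char)
    (ht : takeRun x t = 0) :
    maxRunSpec x (List.replicate m x ++ t) = max m (maxRunSpec x t) := by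
  induction m with
  | zero => simp
  | succ m ih =>
    simp only [List.replicate_succ, List.cons_append, maxRunSpec, beq_self_eq_true, if_true, ih,
      takeRun_replicate_append, ht]
    omega

theorem maxRunSpec_replicate_append_ne (c x : Char) (hne : c ≠ x) (m : Nat) (t : List Char) :
    maxRunSpec c (List.replicate m x ++ t) = maxRunSpec c t := by
  induction m with
  | zero => simp
  | succ m ih =>
    have : (x == c) = false := by simp [Ne.symm hne]
    simp [List.replicate_succ, maxRunSpec, this, ih]

theorem prefix_replicate_iff (c : Char) (k : Nat) (t : List Char) :
    List.replicate k c <+: t ↔ k ≤ takeRun c t := by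
  induction k generalizing t with
  | zero => simp
  | succ k ih =>
    cases t with
    | nil => simp [takeRun, List.replicate_succ]
    | cons x xs =>
      rw [List.replicate_succ, List.cons_prefix_cons]
      by_cases h : x = c
      · subst h; simp [takeRun, ih]
      · simp [takeRun, h, Ne.symm h]

theorem isIn_replicate_iff (c : Char) (k : Nat) (s : List Char) (hk : 1 ≤ k) :
    PySem.Chars.isIn (List.replicate k c) s = true ↔ k ≤ maxRunSpec c s := by
  rw [← PySem.Chars.exists_prefix_drop_iff_isIn]
  simp only [prefix_replicate_iff]
  induction s with
  | nil =>
    constructor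
    · rintro ⟨j, hj⟩; simp [takeRun] at hj; omega
    · intro h; simp [maxRunSpec] at h; omega
  | cons x rest ih =>
    constructor
    · rintro ⟨j, hj⟩
      cases j with
      | zero =>
        simp only [List.drop_zero] at hj
        simp only [takeRun] at hj
        simp only [maxRunSpec]
        by_cases h : x = c
        · simp [h] at hj ⊢; omega
        · simp [h] at hj; omega
      | succ j =>
        simp only [List.drop_succ_cons] at hj
        have : k ≤ maxRunSpec c rest := ih.1 ⟨j, hj⟩
        simp only [maxRunSpec]; omega
    · intro h
      simp only [maxRunSpec] at h
      by_cases h2 : k ≤ maxRunSpec c rest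
      · obtain ⟨j, hj⟩ := ih.2 h2
        exact ⟨j + 1, by simpa using hj⟩
      · refine ⟨0, ?_⟩
        simp only [List.drop_zero, takeRun]
        omega

theorem bLoop_getD_aux (c : Char) : ∀ (m : Nat) (s : List Char), s.length ≤ m → ∀ (best : PySem.Dict Char Int),
    0 ≤ best.getD c 0 →
    (bLoop best s).getD c 0 = max (best.getD c 0) ((maxRunSpec c s : Nat) : Int) := by
  intro m
  induction m with
  | zero =>
    intro s hs best h0
    have : s = [] := by cases s <;> simp_all
    subst this
    simp only [bLoop, maxRunSpec, Nat.cast_zero]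
    omega
  | succ m ih =>
    intro s hs best h0
    cases s with
    | nil => simp only [bLoop, maxRunSpec, Nat.cast_zero]; omega
    | cons x rest =>
      simp only [bLoop]
      have hdec := takeRun_decomp x rest
      have h0' : 0 ≤ (if best.getD x 0 < (takeRun x rest : Int) + 1
          then best.insert x ((takeRun x rest : Int) + 1) else best).getD c 0 := by
        split
        · rw [PySem.Dict.getD_insert]
          split
          · omega
          · exact h0
        · exact h0
      rw [ih (rest.drop (takeRun x rest)) (by simp at hs ⊢; omega) _ h0']
      by_cases hc : c = x
      · subst hc
        have hrest : maxRunSpec c rest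
            = max (takeRun c rest) (maxRunSpec c (rest.drop (takeRun c rest))) := by
          conv_lhs => rw [hdec.1]
          rw [maxRunSpec_replicate_append_self c (takeRun c rest) _ hdec.2]
        have hcons : maxRunSpec c (c :: rest)
            = max (takeRun c rest + 1) (maxRunSpec c (rest.drop (takeRun c rest))) := by
          simp only [maxRunSpec, beq_self_eq_true, if_true, hrest]
          omega
        rw [hcons]
        split
        · rw [PySem.Dict.getD_insert, if_pos rfl]
          push_cast
          omega
        · push_cast
          omega
      · have hrest : maxRunSpec c rest = maxRunSpec c (rest.drop (takeRun x rest)) := by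
          conv_lhs => rw [hdec.1]
          exact maxRunSpec_replicate_append_ne c x hc (takeRun x rest) _
        have hcons : maxRunSpec c (x :: rest) = maxRunSpec c (rest.drop (takeRun x rest)) := by
          have hxc : (x == c) = false := by simp [Ne.symm hc]
          simp only [maxRunSpec, hxc, Bool.false_eq_true, if_false, hrest]
          omega
        have hbest : (if best.getD x 0 < (takeRun x rest : Int) + 1
            then best.insert x ((takeRun x rest : Int) + 1) else best).getD c 0 = best.getD c 0 := by
          split
          · rw [PySem.Dict.getD_insert, if_neg hc]
          · rfl
        rw [hbest, hcons]

theorem bLoop_getD (c : Char) (s : List Char) (best : PySem.Dict Char Int) :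
    0 ≤ best.getD c 0 →
    (bLoop best s).getD c 0 = max (best.getD c 0) ((maxRunSpec c s : Nat) : Int) :=
  bLoop_getD_aux c s.length s le_rfl best

theorem bLoop_keys_nodup : ∀ (m : Nat) (s : List Char), s.length ≤ m → ∀ (best : PySem.Dict Char Int),
    best.keys.Nodup → (bLoop best s).keys.Nodup := by
  intro m
  induction m with
  | zero =>
    intro s hs best hb
    have : s = [] := by cases s <;> simp_all
    subst this; simpa [bLoop]
  | succ m ih =>
    intro s hs best hb
    cases s with
    | nil => simpa [bLoop]
    | cons x rest =>
      rw [bLoop]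
      apply ih _ (by simp at hs ⊢; omega)
      split
      · exact PySem.Dict.nodup_keys_insert _ _ _ hb
      · exact hb

theorem charB (s : List Char) :
    ((bLoop PySem.Dict.empty s).values).any (fun v => v == 2) = true ↔ ∃ c, maxRunSpec c s = 2 := by
  have hget : ∀ c, (bLoop PySem.Dict.empty s).getD c 0 = ((maxRunSpec c s : Nat) : Int) := by
    intro c
    rw [bLoop_getD c s PySem.Dict.empty (by simp [PySem.Dict.getD_empty])]
    simp [PySem.Dict.getD_empty]
  have hnd : (bLoop PySem.Dict.empty s).keys.Nodup :=
    bLoop_keys_nodup s.length s le_rfl PySem.Dict.empty (by simp [PySem.Dict.keys_empty])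
  rw [List.any_eq_true]
  constructor
  · rintro ⟨v, hv, hveq⟩
    rw [PySem.Dict.values_eq_map_keys _ hnd 0] at hv
    obtain ⟨k, _, rfl⟩ := List.mem_map.mp hv
    refine ⟨k, ?_⟩
    have h2 : ((maxRunSpec k s : Nat) : Int) = 2 := by
      rw [← hget k]; simpa using hveq
    exact_mod_cast h2
  · rintro ⟨c, hc⟩
    have hgc : (bLoop PySem.Dict.empty s).getD c 0 = 2 := by
      rw [hget c, hc]; norm_num
    have hkmem : c ∈ (bLoop PySem.Dict.empty s).keys := by
      by_contra hnot
      have hnone : (bLoop PySem.Dict.empty s).get? c = none := by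
        rw [PySem.Dict.get?_eq_none_iff_not_mem_keys]; exact hnot
      rw [PySem.Dict.getD_eq_get?_getD, hnone] at hgc
      simp at hgc
    refine ⟨(bLoop PySem.Dict.empty s).getD c 0, ?_, by rw [hgc]; rfl⟩
    rw [PySem.Dict.values_eq_map_keys _ hnd 0]
    exact List.mem_map.mpr ⟨c, hkmem, rfl⟩

theorem charA (s : List Char) :
    ((PySem.List.pyRange 0 ((s.length : Int) - 1) 1).any (fun i =>
      match PySem.Chars.pyGet? s i, PySem.Chars.pyGet? s (i + 1) with
      | some a, some b =>
        if a == b then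
          PySem.Chars.isIn [a, a] s && !(PySem.Chars.isIn [a, a, a] s)
        else false
      | _, _ => false)) = true ↔ ∃ c, maxRunSpec c s = 2 := by
  rw [List.any_eq_true]
  constructor
  · rintro ⟨i, hmem, hf⟩
    rcases h1 : PySem.Chars.pyGet? s i with _ | a
    · simp only [h1] at hf
      exact absurd hf Bool.false_ne_true
    rcases h2 : PySem.Chars.pyGet? s (i + 1) with _ | b
    · simp only [h1, h2] at hf
      exact absurd hf Bool.false_ne_true
    simp only [h1, h2] at hf
    by_cases hab : (a == b) = true
    · simp only [hab, if_true, Bool.and_eq_true, Bool.not_eq_eq_eq_not, Bool.not_true] at hf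
      have hrep2 : List.replicate 2 a = [a, a] := rfl
      have hrep3 : List.replicate 3 a = [a, a, a] := rfl
      have h2le : 2 ≤ maxRunSpec a s :=
        (isIn_replicate_iff a 2 s (by norm_num)).mp (by rw [hrep2]; exact hf.1)
      have h3lt : ¬ 3 ≤ maxRunSpec a s := by
        intro h
        have := (isIn_replicate_iff a 3 s (by norm_num)).mpr h
        rw [hrep3] at this
        rw [hf.2] at this
        exact Bool.false_ne_true this
      exact ⟨a, by omega⟩
    · simp only [hab] at hf
      simp at hf
  · rintro ⟨c, hc⟩
    have hrep2 : List.replicate 2 c = [c, c] := rfl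
    have hrep3 : List.replicate 3 c = [c, c, c] := rfl
    have hin2 : PySem.Chars.isIn [c, c] s = true := by
      rw [← hrep2]
      exact (isIn_replicate_iff c 2 s (by norm_num)).mpr (by omega)
    have hin3 : PySem.Chars.isIn [c, c, c] s = false := by
      rw [← hrep3]
      apply Bool.eq_false_iff.mpr
      intro h
      have := (isIn_replicate_iff c 3 s (by norm_num)).mp h
      omega
    obtain ⟨j, hj⟩ := (PySem.Chars.exists_prefix_drop_iff_isIn _ _).mpr hin2
    obtain ⟨t, ht⟩ := hj
    have hdropj : s.drop j = c :: c :: t := by simpa using ht.symm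
    have hlen : j + 2 ≤ s.length := by
      have := congrArg List.length hdropj
      simp at this
      omega
    have hg0 : s[j]? = some c := by
      have : (s.drop j)[0]? = s[j + 0]? := List.getElem?_drop
      simp [hdropj] at this
      simpa using this.symm
    have hg1 : s[j + 1]? = some c := by
      have : (s.drop j)[1]? = s[j + 1]? := List.getElem?_drop
      simp [hdropj] at this
      exact this.symm
    refine ⟨(j : Int), ?_, ?_⟩
    · rw [PySem.List.mem_pyRange_one]
      constructor
      · positivity
      · omega
    · have hp0 : PySem.Chars.pyGet? s ((j : Nat) : Int) = some c := by
        simp [PySem.List.pyGet?_natCast, hg0]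
      have hp1 : PySem.Chars.pyGet? s (((j : Nat) : Int) + 1) = some c := by
        have hcast : ((j : Nat) : Int) + 1 = (((j + 1 : Nat)) : Int) := by push_cast; ring
        rw [hcast, PySem.Chars.pyGet?_eq_listPyGet?, PySem.List.pyGet?_natCast]
        exact hg1
      simp only [hp0, hp1, beq_self_eq_true, if_true, hin2, hin3]
      rfl

-- ===== VERDICT (by name: the statement is the Claim_ definition above) =====
theorem modifiedAdj_spec : Claim_equal_modifiedAdj := by
  intro n _
  unfold Spec_modifiedAdj modifiedAdj modifiedAdj_alt
  rw [Bool.eq_iff_iff, charA (PySem.Int.toChars n), charB (PySem.Int.toChars n)]
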